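-- pv_equiv track=rewrite | github.com/whoiswillma/nlp-experiments | luke_util.py | take_closure_over_entity_spans
-- ===== SOURCE A (Python) =====
-- from typing import Collection, Optional, Union, TypeVar
--
-- EntityTokenSpan = tuple[int, int]
--
-- def take_closure_over_entity_spans_to_labels(
--     entity_spans_to_labels: dict[EntityTokenSpan, int]
-- ) -> dict[EntityTokenSpan, int]:
--     """Returns a closure over `entity_spans_to_labels` such that, for every
--     entity span (i, j) and associated label l, all sub spans (i', j') such that
--     i <= i' < j' <= j is associated with l in its closure.
--     """
--
--     if len(entity_spans_to_labels) == 0: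
--         return {}
--
--     idx_to_label: list[Optional[int]] = [None] * max(
--         end for _, end in entity_spans_to_labels
--     )
--     for entity_span, label in entity_spans_to_labels.items():
--         start, end = entity_span
--         for i in range(start, end):
--             idx_to_label[i] = label
--
--     closure: dict[EntityTokenSpan, int] = {}
--
--     def add_all_spans_to_closure(start, end, label):
--         for inner_start in range(start, end):
--             for inner_end in range(inner_start + 1, end + 1):
--                 closure[(inner_start, inner_end)] = label
--
--     prev_label = None
--     start_index = None
--
--     # causes loop body to execute one more time if current_label != None
--     idx_to_label += [None]
--
--     for i, label in enumerate(idx_to_label):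
--         if prev_label != label:
--             if prev_label is not None:
--                 add_all_spans_to_closure(start_index, i, prev_label)
--
--             prev_label = label
--             start_index = i
--
--     return closure
--
-- def take_closure_over_entity_spans(
--     entity_spans: Collection[EntityTokenSpan],
-- ) -> set[EntityTokenSpan]:
--     fake_entity_spans_to_labels = {entity_span: 0 for entity_span in entity_spans}
--     fake_entity_spans_to_labels = take_closure_over_entity_spans_to_labels(
--         fake_entity_spans_to_labels
--     )
--     return set(fake_entity_spans_to_labels.keys())
-- ===== SOURCE B (Python) =====
-- # B: covered-index set + per-start extension instead of A's dense label array and run state machine.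
-- def take_closure_over_entity_spans(entity_spans):
--     covered = {i for start, end in entity_spans for i in range(start, end)}
--     out = []
--     for i in sorted(covered):
--         j = i + 1
--         while j in covered:
--             j += 1
--         for k in range(i + 1, j + 1):
--             out.append((i, k))
--     return set(out)
-- ===== Notes on version B (the rewrite author's own statement) =====
-- stated objective: alternative
-- what changed: B replaces A's dense index->label array of size max(end) plus a stateful run-detecting scan with a set of covered indices, sorted once, extending each start with a while loop; Pre_ excludes spans with negative start (start<end), on which A either raises IndexError or silently wraps the negative index to the array tail.
-- outside the precondition, e.g. on take_closure_over_entity_spans([(0, 0), (-1, 1)]): A returns {(0, 1)}, B returns {(-1, 0), (-1, 1), (0, 1)}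
import Mathlib
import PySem

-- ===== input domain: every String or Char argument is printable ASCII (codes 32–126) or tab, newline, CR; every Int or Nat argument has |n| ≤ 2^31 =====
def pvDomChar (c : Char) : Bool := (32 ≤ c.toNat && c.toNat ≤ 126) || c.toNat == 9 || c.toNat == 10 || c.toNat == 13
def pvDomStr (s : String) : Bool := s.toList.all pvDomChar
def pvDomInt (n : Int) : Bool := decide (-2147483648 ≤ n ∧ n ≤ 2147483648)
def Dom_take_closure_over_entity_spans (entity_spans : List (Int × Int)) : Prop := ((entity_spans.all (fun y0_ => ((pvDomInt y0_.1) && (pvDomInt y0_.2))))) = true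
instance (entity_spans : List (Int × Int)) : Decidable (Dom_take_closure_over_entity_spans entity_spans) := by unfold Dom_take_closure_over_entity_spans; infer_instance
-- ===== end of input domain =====

-- B replaces A's dense index->label array (size max end) and stateful run-detecting scan by a set of covered
-- indices, sorted once, with a while-loop extension per start index (objective: alternative algorithm).

-- ===== PORT A =====
-- add_all_spans_to_closure(start, end, label)
def pvAddAll (clo : PySem.Dict (Int × Int) Int) (start fin label : Int) : PySem.Dict (Int × Int) Int :=
  (PySem.List.pyRange start fin 1).foldl (fun c is =>
    (PySem.List.pyRange (is + 1) (fin + 1) 1).foldl (fun c ie => c.insert (is, ie) label) c) clo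

-- loop body of `for i, label in enumerate(idx_to_label)`
def pvScanStep (st : PySem.Dict (Int × Int) Int × Option Int × Option Int)
    (p : Int × Option Int) : PySem.Dict (Int × Int) Int × Option Int × Option Int :=
  if st.2.1 ≠ p.2 then
    let clo' := match st.2.1 with
      | some l => pvAddAll st.1 (st.2.2.getD 0) p.1 l  -- start_index is always set when prev_label ≠ None
      | none => st.1
    (clo', p.2, some p.1)
  else st

-- max(end for _, end in d): the dict is nonempty at the call site, so the .getD default is never used
def pvMaxEnd (d : PySem.Dict (Int × Int) Int) : Int :=
  (PySem.List.max? (d.keys.map (fun k => k.2)) (fun y => y)).getD 0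

-- idx_to_label after the marking loop; pySetD is exact where Python's
-- idx_to_label[i] = label does not raise (guaranteed by Pre_)
def pvMark (d : PySem.Dict (Int × Int) Int) : List (Option Int) :=
  d.items.foldl (fun a kv =>
      (PySem.List.pyRange kv.1.1 kv.1.2 1).foldl (fun a i => PySem.List.pySetD a i (some kv.2)) a)
    (List.replicate (pvMaxEnd d).toNat none)   -- [None] * maxEnd ([] for maxEnd < 0, as in Python)

-- take_closure_over_entity_spans_to_labels
def pvClosureLabels (d : PySem.Dict (Int × Int) Int) : PySem.Dict (Int × Int) Int :=
  if d.size = 0 then PySem.Dict.empty else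
  ((PySem.List.enumerate (pvMark d ++ [none]) 0).foldl pvScanStep (PySem.Dict.empty, none, none)).1

def take_closure_over_entity_spans (entity_spans : List (Int × Int)) : List (Int × Int) :=
  let fake := entity_spans.foldl (fun d sp => d.insert sp (0 : Int)) PySem.Dict.empty
  PySem.Set.ofList (pvClosureLabels fake).keys

-- ===== PORT B =====
-- termination helper for the `while j in covered` loop
theorem pvFilterLenMono (l : List Int) (j : Int) :
    (l.filter (fun x => decide (j < x))).length ≤ (l.filter (fun x => decide (j ≤ x))).length := by
  induction l with
  | nil => simp
  | cons a t ih =>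
    by_cases h1 : j < a <;> by_cases h2 : j ≤ a <;>
      simp [h1, h2] <;> omega

theorem pvExtendDec' (l : List Int) (j : Int) (h : j ∈ l) :
    (l.filter (fun x => decide (j < x))).length < (l.filter (fun x => decide (j ≤ x))).length := by
  induction l with
  | nil => cases h
  | cons a t ih =>
    rcases List.mem_cons.mp h with rfl | hmem
    · have hmono := pvFilterLenMono t j
      simp
      omega
    · have := ih hmem
      by_cases h1 : j < a <;> by_cases h2 : j ≤ a <;>
        simp [h1, h2] <;> omega

theorem pvExtendDec (covered : List Int) (j : Int) (h : j ∈ covered) :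
    (covered.filter (fun x => decide (j + 1 ≤ x))).length < (covered.filter (fun x => decide (j ≤ x))).length := by
  simpa using pvExtendDec' covered j h

def pvExtend (covered : List Int) (j : Int) : Int :=
  if j ∈ covered then pvExtend covered (j + 1) else j
termination_by (covered.filter (fun x => decide (j ≤ x))).length
decreasing_by exact pvExtendDec covered j (by assumption)

def take_closure_over_entity_spans_alt (entity_spans : List (Int × Int)) : List (Int × Int) :=
  let covered : PySem.Set Int :=
    entity_spans.foldl (fun st sp => PySem.Set.update st (PySem.List.pyRange sp.1 sp.2 1)) PySem.Set.empty
  let out := (PySem.List.sorted covered (fun x => x) false).foldl (fun acc i =>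
      acc ++ (PySem.List.pyRange (i + 1) (pvExtend covered (i + 1) + 1) 1).map (fun k => (i, k))) []
  PySem.Set.ofList out

-- ===== PRECONDITION & SPEC =====
-- Pre_ excludes spans with negative start (and start < end): there Python A either raises IndexError or
-- silently wraps the negative index to the tail of its label array, an artefact of its implementation.
def Pre_take_closure_over_entity_spans (entity_spans : List (Int × Int)) : Prop :=
  ∀ sp ∈ entity_spans, sp.1 < sp.2 → 0 ≤ sp.1
instance (entity_spans : List (Int × Int)) : Decidable (Pre_take_closure_over_entity_spans entity_spans) := by
  unfold Pre_take_closure_over_entity_spans; infer_instance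

def pvWitness_take_closure_over_entity_spans : (List (Int × Int)) := [(0, 2), (3, 5), (1, 3)]

def Spec_take_closure_over_entity_spans (entity_spans : List (Int × Int)) (out : List (Int × Int)) : Prop := out = take_closure_over_entity_spans_alt entity_spans
instance (entity_spans : List (Int × Int)) (out : List (Int × Int)) : Decidable (Spec_take_closure_over_entity_spans entity_spans out) := by unfold Spec_take_closure_over_entity_spans; infer_instance

-- ===== CLAIM (what is proved, stated in full; the proofs are below) =====
def Claim_equal_take_closure_over_entity_spans : Prop := ∀ (entity_spans : List (Int × Int)), Dom_take_closure_over_entity_spans entity_spans → Pre_take_closure_over_entity_spans entity_spans → Spec_take_closure_over_entity_spans entity_spans (take_closure_over_entity_spans entity_spans)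

-- ===== LEMMAS AND PROOFS =====

-- `cov spans i`: token index i lies inside some span
def pvCovB (spans : List (Int × Int)) (i : Int) : Bool :=
  spans.any (fun sp => decide (sp.1 ≤ i) && decide (i < sp.2))

def pvToOpt (b : Bool) : Option Int := if b then some 0 else none

def pvEmitOne (i e : Int) : List (Int × Int) :=
  (PySem.List.pyRange (i + 1) (e + 1) 1).map (fun k => (i, k))

def pvEmitList (s e : Int) : List (Int × Int) :=
  (PySem.List.pyRange s e 1).flatMap (fun is => pvEmitOne is e)

-- canonical per-start emission over the coverage bitmap
def pvCemit (i : Int) : List Bool → List (Int × Int)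
  | [] => []
  | b :: t =>
    if b then pvEmitOne i (i + 1 + ((t.takeWhile (fun x => x)).length : Int)) ++ pvCemit (i + 1) t
    else pvCemit (i + 1) t

-- A's run-detecting state machine, abstracted to the coverage bitmap
def pvMach (i : Int) (prev : Bool) (st : Int) : List Bool → List (Int × Int)
  | [] => if prev then pvEmitList st i else []
  | b :: t =>
    if prev ≠ b then (if prev then pvEmitList st i ++ pvMach (i + 1) b i t else pvMach (i + 1) b i t)
    else pvMach (i + 1) prev st t

theorem pvEmitList_nil (s e : Int) (h : e ≤ s) : pvEmitList s e = [] := by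
  simp [pvEmitList, PySem.List.pyRange_one_eq_nil h]

theorem pvEmitList_cons (s e : Int) (h : s < e) :
    pvEmitList s e = pvEmitOne s e ++ pvEmitList (s + 1) e := by
  rw [pvEmitList, PySem.List.pyRange_one_cons h, List.flatMap_cons]; rfl

theorem pvUpdateAppend {α : Type} [BEq α] (s : List α) (l1 l2 : List α) :
    PySem.Set.update s (l1 ++ l2) = PySem.Set.update (PySem.Set.update s l1) l2 := by
  simp [PySem.Set.update, List.foldl_append]

theorem pvAddAllFoldKeys (e l : Int) (rng : List Int) : ∀ (clo : PySem.Dict (Int × Int) Int),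
    (rng.foldl (fun c is => (PySem.List.pyRange (is + 1) (e + 1) 1).foldl (fun c ie => c.insert (is, ie) l) c) clo).keys
      = PySem.Set.update clo.keys (rng.flatMap (fun is => pvEmitOne is e)) := by
  induction rng with
  | nil => intro clo; rfl
  | cons a t ih =>
    intro clo
    rw [List.foldl_cons, ih, List.flatMap_cons, pvUpdateAppend]
    congr 1
    exact PySem.Dict.keys_foldl_insert_key _ _ _ _

theorem pvAddAllKeys (clo : PySem.Dict (Int × Int) Int) (s e l : Int) :
    (pvAddAll clo s e l).keys = PySem.Set.update clo.keys (pvEmitList s e) := by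
  rw [pvAddAll, pvAddAllFoldKeys, pvEmitList]

theorem pvCemitCollapse (t : List Bool) : ∀ (a : Int),
    pvCemit a t = pvEmitList a (a + ((t.takeWhile (fun x => x)).length : Int)) ++
      pvCemit (a + ((t.takeWhile (fun x => x)).length : Int) + 1) (t.drop ((t.takeWhile (fun x => x)).length + 1)) := by
  induction t with
  | nil => intro a; simp [pvCemit, pvEmitList_nil a a le_rfl]
  | cons b t ih =>
    intro a
    cases b
    · simp only [pvCemit, List.takeWhile_cons, if_false, Bool.false_eq_true,
        List.length_nil, Int.natCast_zero, add_zero, List.drop_succ_cons, List.drop_zero]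
      rw [pvEmitList_nil a a le_rfl, List.nil_append]
    · have harith : a + (((t.takeWhile (fun x => x)).length + 1 : Nat) : Int)
          = a + 1 + ((t.takeWhile (fun x => x)).length : Int) := by push_cast; ring
      simp only [pvCemit, List.takeWhile_cons, if_true, List.length_cons,
        List.drop_succ_cons, harith]
      rw [ih (a + 1), pvEmitList_cons a (a + 1 + ((t.takeWhile (fun x => x)).length : Int)) (by omega)]
      rw [List.append_assoc]

theorem pvMachEq (bsl : List Bool) :
    (∀ (i st : Int), pvMach i false st bsl = pvCemit i bsl) ∧
    (∀ (i st : Int), pvMach i true st bsl =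
      pvEmitList st (i + ((bsl.takeWhile (fun x => x)).length : Int)) ++
        pvCemit (i + ((bsl.takeWhile (fun x => x)).length : Int) + 1) (bsl.drop ((bsl.takeWhile (fun x => x)).length + 1))) := by
  induction bsl with
  | nil =>
    constructor
    · intro i st; simp [pvMach, pvCemit]
    · intro i st; simp [pvMach, pvCemit, pvEmitList]
  | cons b t ih =>
    obtain ⟨ihF, ihT⟩ := ih
    constructor
    · intro i st
      cases b
      · simpa [pvMach, pvCemit] using ihF (i + 1) st
      · have hm : pvMach i false st (true :: t) = pvMach (i + 1) true i t := by simp [pvMach]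
        have hc : pvCemit i (true :: t)
            = pvEmitOne i (i + 1 + ((t.takeWhile (fun x => x)).length : Int)) ++ pvCemit (i + 1) t := by
          simp [pvCemit]
        rw [hm, ihT (i + 1) i, hc, pvCemitCollapse t (i + 1),
          pvEmitList_cons i (i + 1 + ((t.takeWhile (fun x => x)).length : Int)) (by omega),
          List.append_assoc]
    · intro i st
      cases b
      · have hm : pvMach i true st (false :: t) = pvEmitList st i ++ pvMach (i + 1) false i t := by
          simp [pvMach]
        rw [hm, ihF (i + 1) i]
        simp
      · have hm : pvMach i true st (true :: t) = pvMach (i + 1) true st t := by simp [pvMach]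
        rw [hm, ihT (i + 1) st]
        simp only [List.takeWhile_cons, if_true, List.length_cons,
          List.drop_succ_cons]
        congr 2 <;> push_cast <;> omega

theorem pvScanKeys (bsl : List Bool) : ∀ (i0 : Int) (clo : PySem.Dict (Int × Int) Int) (prevB : Bool) (stOpt : Option Int),
    ((PySem.List.enumerate ((bsl.map pvToOpt) ++ [(none : Option Int)]) i0).foldl pvScanStep (clo, pvToOpt prevB, stOpt)).1.keys
      = PySem.Set.update clo.keys (pvMach i0 prevB (stOpt.getD 0) bsl) := by
  induction bsl with
  | nil =>
    intro i0 clo prevB stOpt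
    cases prevB
    · simp [PySem.List.enumerate, pvScanStep, pvToOpt, pvMach, PySem.Set.update]
    · simp [PySem.List.enumerate, pvScanStep, pvToOpt, pvMach, pvAddAllKeys]
  | cons b t ih =>
    intro i0 clo prevB stOpt
    cases prevB <;> cases b
    · -- none, none: unchanged
      simpa [PySem.List.enumerate, pvScanStep, pvToOpt, pvMach] using ih (i0 + 1) clo false stOpt
    · -- none -> some 0
      simpa [PySem.List.enumerate, pvScanStep, pvToOpt, pvMach] using ih (i0 + 1) clo true (some i0)
    · -- some 0 -> none: emit the finished run
      have h := ih (i0 + 1) (pvAddAll clo (stOpt.getD 0) i0 0) false (some i0)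
      simp only [pvToOpt, pvMach] at h ⊢
      simp only [pvAddAllKeys] at h
      rw [← pvUpdateAppend] at h
      simpa using h
    · -- some 0, some 0: unchanged
      simpa [PySem.List.enumerate, pvScanStep, pvToOpt, pvMach] using ih (i0 + 1) clo true stOpt

theorem pvCovBCons (sp : Int × Int) (l : List (Int × Int)) (x : Int) :
    pvCovB (sp :: l) x = ((decide (sp.1 ≤ x) && decide (x < sp.2)) || pvCovB l x) := by
  simp [pvCovB]

theorem pvCovBOfList (spans : List (Int × Int)) (x : Int) :
    pvCovB (PySem.Set.ofList spans) x = pvCovB spans x := by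
  rw [Bool.eq_iff_iff]
  simp [pvCovB, List.any_eq_true, PySem.Set.mem_ofList]

theorem pvSetMapRange (N : Nat) (g : Int → Option Int) (i : Int) (v : Option Int) (h0 : 0 ≤ i) (_h1 : i < (N : Int)) :
    PySem.List.pySetD ((PySem.List.pyRange 0 (N : Int) 1).map g) i v
      = (PySem.List.pyRange 0 (N : Int) 1).map (fun x => if x = i then v else g x) := by
  rw [PySem.List.pySetD_of_nonneg _ v h0]
  apply List.ext_getElem
  · simp [PySem.List.length_pyRange_one]
  · intro k hk1 hk2
    have hkN : k < N := by
      simpa [PySem.List.length_pyRange_one] using hk2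
    have hset : k < (((PySem.List.pyRange 0 (N : Int) 1).map g)).length := by
      simpa [PySem.List.length_pyRange_one] using hk2
    rw [List.getElem_set]
    by_cases hki : (k : Int) = i
    · have : i.toNat = k := by omega
      simp [this, List.getElem_map, PySem.List.getElem_pyRange_one, hki]
    · have : ¬ (i.toNat = k) := by omega
      simp [this, List.getElem_map, PySem.List.getElem_pyRange_one, hki]

theorem pvMarkInner (N : Nat) (s e : Int) (g : Int → Option Int) (hs : 0 ≤ s) (he : e ≤ (N : Int)) :
    (PySem.List.pyRange s e 1).foldl (fun a i => PySem.List.pySetD a i (some 0)) ((PySem.List.pyRange 0 (N : Int) 1).map g)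
      = (PySem.List.pyRange 0 (N : Int) 1).map (fun x => if s ≤ x ∧ x < e then some 0 else g x) := by
  suffices H : ∀ (n : Nat) (s : Int) (g : Int → Option Int), 0 ≤ s → (e - s).toNat = n →
      (PySem.List.pyRange s e 1).foldl (fun a i => PySem.List.pySetD a i (some 0)) ((PySem.List.pyRange 0 (N : Int) 1).map g)
        = (PySem.List.pyRange 0 (N : Int) 1).map (fun x => if s ≤ x ∧ x < e then some 0 else g x) by
    exact H (e - s).toNat s g hs rfl
  intro n
  induction n with
  | zero =>
    intro s g hs0 hn
    have hes : e ≤ s := by omega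
    rw [PySem.List.pyRange_one_eq_nil hes, List.foldl_nil]
    congr 1
    funext x
    split_ifs with h
    · exact absurd h (by omega)
    · rfl
  | succ n ihn =>
    intro s g hs0 hn
    have hse : s < e := by omega
    rw [PySem.List.pyRange_one_cons hse, List.foldl_cons,
      pvSetMapRange N g s (some 0) hs0 (by omega),
      ihn (s + 1) _ (by omega) (by omega)]
    congr 1
    funext x
    by_cases h1 : s + 1 ≤ x ∧ x < e <;> by_cases h2 : x = s <;> by_cases h3 : s ≤ x ∧ x < e <;>
      simp [h1, h2, h3] <;> omega

theorem pvMarkFold (N : Nat) (l : List (Int × Int)) (g : Int → Option Int)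
    (hl : ∀ sp ∈ l, sp.1 < sp.2 → 0 ≤ sp.1 ∧ sp.2 ≤ (N : Int)) :
    l.foldl (fun a kv => (PySem.List.pyRange kv.1 kv.2 1).foldl (fun a i => PySem.List.pySetD a i (some (0 : Int))) a)
        ((PySem.List.pyRange 0 (N : Int) 1).map g)
      = (PySem.List.pyRange 0 (N : Int) 1).map (fun x => if pvCovB l x then some 0 else g x) := by
  induction l generalizing g with
  | nil => rw [List.foldl_nil]; rfl
  | cons sp l ih =>
    rw [List.foldl_cons]
    by_cases hsp : sp.1 < sp.2
    · obtain ⟨h0, hN⟩ := hl sp (List.mem_cons_self) hsp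
      rw [pvMarkInner N sp.1 sp.2 g h0 hN, ih _ (fun q hq hlt => hl q (List.mem_cons_of_mem _ hq) hlt)]
      congr 1
      funext x
      rw [pvCovBCons]
      by_cases hc : pvCovB l x = true <;> by_cases hx1 : sp.1 ≤ x <;> by_cases hx2 : x < sp.2 <;>
        simp [hc, hx1, hx2]
    · rw [show PySem.List.pyRange sp.1 sp.2 1 = [] from PySem.List.pyRange_one_eq_nil (by omega),
        List.foldl_nil, ih g (fun q hq hlt => hl q (List.mem_cons_of_mem _ hq) hlt)]
      congr 1
      funext x
      rw [pvCovBCons]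
      have : ¬ (sp.1 ≤ x ∧ x < sp.2) := by omega
      simp [this]

theorem pvFakeItems (spans : List (Int × Int)) :
    (spans.foldl (fun d sp => d.insert sp (0 : Int)) PySem.Dict.empty).items
      = (PySem.Set.ofList spans).map (fun k => (k, (0 : Int))) := by
  have hval : ∀ (d : PySem.Dict (Int × Int) Int), (∀ k, d.getD k 0 = 0) →
      ∀ k, (spans.foldl (fun d sp => d.insert sp (0 : Int)) d).getD k 0 = 0 := by
    induction spans with
    | nil => intro d hd k; exact hd k
    | cons sp t ih =>
      intro d hd k
      rw [List.foldl_cons]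
      refine ih _ (fun q => ?_) k
      rw [PySem.Dict.getD_insert]
      split_ifs
      · rfl
      · exact hd q
  have hnd : (spans.foldl (fun d sp => d.insert sp (0 : Int)) PySem.Dict.empty).keys.Nodup :=
    PySem.Dict.nodup_keys_foldl_insert spans _ PySem.Dict.empty (by simp)
  have hk : (spans.foldl (fun d sp => d.insert sp (0 : Int)) PySem.Dict.empty).keys = PySem.Set.ofList spans := by
    rw [PySem.Dict.keys_foldl_insert]
    rfl
  rw [PySem.Dict.items_eq_map_keys _ hnd 0, hk]
  refine List.map_congr_left (fun k hkmem => ?_)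
  rw [hval PySem.Dict.empty (fun q => by simp [PySem.Dict.getD_empty]) k]

theorem pvCoveredMem (spans : List (Int × Int)) (x : Int) :
    x ∈ (spans.foldl (fun st sp => PySem.Set.update st (PySem.List.pyRange sp.1 sp.2 1)) PySem.Set.empty) ↔ pvCovB spans x = true := by
  have aux : ∀ (l : List (Int × Int)) (s0 : List Int),
      x ∈ l.foldl (fun st sp => PySem.Set.update st (PySem.List.pyRange sp.1 sp.2 1)) s0 ↔
        x ∈ s0 ∨ pvCovB l x = true := by
    intro l
    induction l with
    | nil => intro s0; simp [pvCovB]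
    | cons sp t ih =>
      intro s0
      rw [List.foldl_cons, ih, PySem.Set.mem_update, pvCovBCons]
      simp [PySem.List.mem_pyRange_one]
      tauto
  rw [aux spans PySem.Set.empty]
  simp [PySem.Set.empty]

theorem pvCoveredNodup (spans : List (Int × Int)) :
    (spans.foldl (fun st sp => PySem.Set.update st (PySem.List.pyRange sp.1 sp.2 1)) (PySem.Set.empty : PySem.Set Int)).Nodup := by
  have aux : ∀ (l : List (Int × Int)) (s0 : List Int), s0.Nodup →
      (l.foldl (fun st sp => PySem.Set.update st (PySem.List.pyRange sp.1 sp.2 1)) s0).Nodup := by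
    intro l
    induction l with
    | nil => intro s0 h; exact h
    | cons sp t ih =>
      intro s0 h
      rw [List.foldl_cons]
      exact ih _ (PySem.Set.nodup_update _ _ h)
  exact aux spans PySem.Set.empty List.nodup_nil

theorem pvExtTake (spans : List (Int × Int)) (covered : List Int)
    (hmem : ∀ x, x ∈ covered ↔ pvCovB spans x = true) (t : List Bool) : ∀ (a : Int),
    t = (PySem.List.pyRange a (a + (t.length : Int)) 1).map (pvCovB spans) →
    (∀ j, a + (t.length : Int) ≤ j → pvCovB spans j = false) →
    pvExtend covered a = a + ((t.takeWhile (fun x => x)).length : Int) := by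
  induction t with
  | nil =>
    intro a h1 h2
    have hca : pvCovB spans a = false := h2 a (by simp)
    have hnc : a ∉ covered := by
      intro hc
      have := (hmem a).mp hc
      rw [this] at hca
      cases hca
    rw [pvExtend, if_neg hnc]
    simp
  | cons b t ih =>
    intro a h1 h2
    have hlt : a < a + (((b :: t).length : Nat) : Int) := by
      simp only [List.length_cons]; push_cast; omega
    rw [PySem.List.pyRange_one_cons hlt, List.map_cons] at h1
    have harr : a + (((b :: t).length : Nat) : Int) = (a + 1) + ((t.length : Nat) : Int) := by
      simp only [List.length_cons]; push_cast; ring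
    rw [harr] at h1
    injection h1 with hb ht
    have hbnd : ∀ j, (a + 1) + ((t.length : Nat) : Int) ≤ j → pvCovB spans j = false := by
      intro j hj
      refine h2 j ?_
      simp only [List.length_cons]; push_cast at hj ⊢; omega
    cases b
    · have hnc : a ∉ covered := by
        intro hc
        have := (hmem a).mp hc
        rw [this] at hb
        cases hb
      rw [pvExtend, if_neg hnc]
      simp
    · have hc : a ∈ covered := (hmem a).mpr hb.symm
      rw [pvExtend, if_pos hc, ih (a + 1) ht hbnd]
      simp only [List.takeWhile_cons, if_true, List.length_cons]
      push_cast
      ring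

theorem pvFlatFilter (spans : List (Int × Int)) (covered : List Int)
    (hmem : ∀ x, x ∈ covered ↔ pvCovB spans x = true) (n : Nat) : ∀ (a : Int),
    (∀ j, a + (n : Int) ≤ j → pvCovB spans j = false) →
    ((PySem.List.pyRange a (a + (n : Int)) 1).filter (pvCovB spans)).flatMap
        (fun p => pvEmitOne p (pvExtend covered (p + 1)))
      = pvCemit a ((PySem.List.pyRange a (a + (n : Int)) 1).map (pvCovB spans)) := by
  induction n with
  | zero =>
    intro a hbnd
    rw [show PySem.List.pyRange a (a + ((0 : Nat) : Int)) 1 = [] from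
      PySem.List.pyRange_one_eq_nil (by omega)]
    rfl
  | succ n ih =>
    intro a hbnd
    have hlt : a < a + (((n + 1 : Nat)) : Int) := by push_cast; omega
    have harr : a + (((n + 1 : Nat)) : Int) = (a + 1) + ((n : Nat) : Int) := by push_cast; ring
    rw [PySem.List.pyRange_one_cons hlt, harr, List.map_cons, List.filter_cons]
    have hbnd' : ∀ j, (a + 1) + ((n : Nat) : Int) ≤ j → pvCovB spans j = false := by
      intro j hj
      refine hbnd j ?_
      push_cast at hj ⊢; omega
    have hlen : ((PySem.List.pyRange (a + 1) ((a + 1) + ((n : Nat) : Int)) 1).map (pvCovB spans)).length = n := by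
      simp [PySem.List.length_pyRange_one]
    cases hcov : pvCovB spans a
    · simp only [Bool.false_eq_true, if_false]
      rw [ih (a + 1) hbnd']
      simp [pvCemit]
    · simp only [if_true]
      rw [List.flatMap_cons, ih (a + 1) hbnd']
      have hext : pvExtend covered (a + 1) = (a + 1) +
          (((((PySem.List.pyRange (a + 1) ((a + 1) + ((n : Nat) : Int)) 1).map (pvCovB spans)).takeWhile (fun x => x)).length : Nat) : Int) := by
        refine pvExtTake spans covered hmem _ (a + 1) ?_ ?_
        · rw [hlen]
        · intro j hj
          rw [hlen] at hj
          exact hbnd' j hj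
      rw [hext]
      simp only [pvCemit]
      rfl

theorem take_closure_over_entity_spans_spec : Claim_equal_take_closure_over_entity_spans := by
  unfold Claim_equal_take_closure_over_entity_spans
  intro spans hdom hpre
  unfold Spec_take_closure_over_entity_spans
  by_cases hnil : spans = []
  · subst hnil; rfl
  · -- shared notation
    have hpre' : ∀ sp ∈ spans, sp.1 < sp.2 → 0 ≤ sp.1 := hpre
    set fake := spans.foldl (fun d sp => d.insert sp (0 : Int)) PySem.Dict.empty with hfake
    set ks := PySem.Set.ofList spans with hks0
    have hkeys : fake.keys = ks := by
      rw [hfake, PySem.Dict.keys_foldl_insert]; rfl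
    have hitems : fake.items = ks.map (fun k => (k, (0 : Int))) := pvFakeItems spans
    have hksne : ks ≠ [] := by
      obtain ⟨x, hx⟩ := List.exists_mem_of_ne_nil spans hnil
      exact List.ne_nil_of_mem ((PySem.Set.mem_ofList spans x).mpr hx)
    have hsz : ¬ fake.size = 0 := by
      have : fake.size = fake.items.length := rfl
      rw [this, hitems, List.length_map]
      intro h
      exact hksne (List.eq_nil_of_length_eq_zero h)
    set M := pvMaxEnd fake with hMdef
    set N := M.toNat with hNdef
    have hmax : ∀ k ∈ ks, k.2 ≤ M := by
      intro k hk
      cases hmx : PySem.List.max? (fake.keys.map (fun k => k.2)) (fun y => y) with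
      | none =>
        rw [PySem.List.max?_eq_none_iff] at hmx
        rw [hkeys] at hmx
        exact absurd (List.map_eq_nil_iff.mp hmx) hksne
      | some m =>
        have hle := PySem.List.max?_isMax hmx (k.2) (by rw [hkeys]; exact List.mem_map_of_mem hk)
        have : M = m := by rw [hMdef, pvMaxEnd, hmx]; rfl
        rw [this]
        exact hle
    have hcovBound : ∀ i, pvCovB spans i = true → 0 ≤ i ∧ i < (N : Int) := by
      intro i hi
      rw [pvCovB, List.any_eq_true] at hi
      obtain ⟨sp, hsp, hcond⟩ := hi
      rw [Bool.and_eq_true, decide_eq_true_eq, decide_eq_true_eq] at hcond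
      have hlt : sp.1 < sp.2 := by omega
      have h0 : 0 ≤ sp.1 := hpre' sp hsp hlt
      have h2 : sp.2 ≤ M := hmax sp ((PySem.Set.mem_ofList spans sp).mpr hsp)
      have hMN : M ≤ (N : Int) := Int.self_le_toNat M
      omega
    have hbnd0 : ∀ j, (0 : Int) + (N : Int) ≤ j → pvCovB spans j = false := by
      intro j hj
      cases hc : pvCovB spans j with
      | false => rfl
      | true => have := hcovBound j hc; omega
    set bsl : List Bool := (PySem.List.pyRange 0 (N : Int) 1).map (pvCovB spans) with hbsl
    -- ===== A side =====
    have hkseq : ∀ sp ∈ ks, sp.1 < sp.2 → 0 ≤ sp.1 ∧ sp.2 ≤ (N : Int) := by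
      intro sp hsp hlt
      have hmem := (PySem.Set.mem_ofList spans sp).mp hsp
      have hMN : M ≤ (N : Int) := Int.self_le_toNat M
      exact ⟨hpre' sp hmem hlt, le_trans (hmax sp hsp) hMN⟩
    have hidx : List.replicate M.toNat (none : Option Int)
        = (PySem.List.pyRange 0 (N : Int) 1).map (fun _ => (none : Option Int)) := by
      apply List.ext_getElem
      · simp [PySem.List.length_pyRange_one]
        omega
      · intro k h1 h2
        simp
    have hmarkeq : pvMark fake = bsl.map pvToOpt := by
      rw [pvMark, hitems, ← hMdef, hidx, List.foldl_map]
      rw [pvMarkFold N ks (fun _ => none) hkseq]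
      rw [hbsl, List.map_map]
      refine List.map_congr_left (fun x hx => ?_)
      simp [pvToOpt, hks0, pvCovBOfList]
    have hA : take_closure_over_entity_spans spans
        = PySem.Set.ofList (pvCemit 0 bsl) := by
      show PySem.Set.ofList (pvClosureLabels fake).keys = _
      rw [pvClosureLabels, if_neg hsz, hmarkeq]
      have hscan := pvScanKeys bsl 0 PySem.Dict.empty false none
      rw [show (PySem.Dict.empty, (none : Option Int), (none : Option Int))
            = (PySem.Dict.empty, pvToOpt false, (none : Option Int)) from rfl, hscan]
      rw [show PySem.Set.update (PySem.Dict.empty : PySem.Dict (Int × Int) Int).keys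
            (pvMach 0 false ((none : Option Int).getD 0) bsl)
          = PySem.Set.ofList (pvMach 0 false 0 bsl) from rfl]
      rw [PySem.Set.ofList_ofList, (pvMachEq bsl).1 0 0]
    -- ===== B side =====
    set covered := spans.foldl (fun st sp => PySem.Set.update st (PySem.List.pyRange sp.1 sp.2 1)) PySem.Set.empty with hcovdef
    have hcmem : ∀ x, x ∈ covered ↔ pvCovB spans x = true := fun x => pvCoveredMem spans x
    have hcnd : covered.Nodup := pvCoveredNodup spans
    have hsorted : PySem.List.sorted covered (fun x => x)
        = (PySem.List.pyRange 0 (N : Int) 1).filter (pvCovB spans) := by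
      refine PySem.List.sorted_eq_of_perm_of_pairwise_lt _ _ _ ?_ ?_
      · refine (List.perm_ext_iff_of_nodup ?_ hcnd).mpr ?_
        · exact (PySem.List.nodup_pyRange_one 0 (N : Int)).filter _
        · intro x
          rw [List.mem_filter, PySem.List.mem_pyRange_one, hcmem x]
          constructor
          · rintro ⟨-, h⟩; exact h
          · intro h; exact ⟨by have := hcovBound x h; omega, h⟩
      · exact (PySem.List.pairwise_lt_pyRange_one 0 (N : Int)).filter _
    have hB : take_closure_over_entity_spans_alt spans
        = PySem.Set.ofList (pvCemit 0 bsl) := by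
      show PySem.Set.ofList ((PySem.List.sorted covered (fun x => x)).foldl (fun acc i =>
          acc ++ (PySem.List.pyRange (i + 1) (pvExtend covered (i + 1) + 1) 1).map (fun k => (i, k))) []) = _
      rw [hsorted]
      rw [show (fun (acc : List (Int × Int)) (i : Int) =>
            acc ++ (PySem.List.pyRange (i + 1) (pvExtend covered (i + 1) + 1) 1).map (fun k => (i, k)))
          = (fun (acc : List (Int × Int)) (i : Int) => acc ++ pvEmitOne i (pvExtend covered (i + 1))) from rfl]
      rw [PySem.List.foldl_append_eq_flatMap (fun p => pvEmitOne p (pvExtend covered (p + 1))), List.nil_append]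
      have hff := pvFlatFilter spans covered hcmem N 0 hbnd0
      rw [zero_add] at hff
      rw [hff, hbsl]
    rw [hA, hB]
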